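-- pv_equiv track=rewrite | github.com/leenasoowq/SmartBot | app.py | sanitize_collection_name
-- ===== SOURCE A (Python) =====
-- def sanitize_collection_name(file_name: str) -> str:
--     """Sanitize file name for Chroma collection."""
--     base_name = file_name.rsplit(".", 1)[0]
--     sanitized = "".join(c for c in base_name if c.isalnum() or c in ["_", "-"])
--     while "__" in sanitized or "--" in sanitized:
--         sanitized = sanitized.replace("__", "_").replace("--", "-")
--     sanitized = sanitized.strip("_-")
--     sanitized = sanitized[:63]
--     if len(sanitized) < 3:
--         sanitized += "_doc"
--     return sanitized
-- ===== SOURCE B (Python) =====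
-- def sanitize_collection_name(file_name: str) -> str:
--     """Sanitize file name for Chroma collection (single-pass rewrite)."""
--     base_name = file_name.rsplit(".", 1)[0]
--     out = []
--     for c in base_name:
--         if c.isalnum():
--             out.append(c)
--         elif c in "_-":
--             if not out or out[-1] != c:
--                 out.append(c)
--     sanitized = "".join(out)
--     sanitized = sanitized.strip("_-")
--     sanitized = sanitized[:63]
--     if len(sanitized) < 3:
--         sanitized += "_doc"
--     return sanitized
-- ===== Notes on version B (the rewrite author's own statement) =====
-- stated objective: simpler
-- what changed: Replaces A's filter pass plus repeated whole-string replace('__','_')/replace('--','-') fixpoint loop with a single stateful pass that keeps a char unless it is a '_'/'-' equal to the last kept char; strip/truncate/pad unchanged.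
import Mathlib
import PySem

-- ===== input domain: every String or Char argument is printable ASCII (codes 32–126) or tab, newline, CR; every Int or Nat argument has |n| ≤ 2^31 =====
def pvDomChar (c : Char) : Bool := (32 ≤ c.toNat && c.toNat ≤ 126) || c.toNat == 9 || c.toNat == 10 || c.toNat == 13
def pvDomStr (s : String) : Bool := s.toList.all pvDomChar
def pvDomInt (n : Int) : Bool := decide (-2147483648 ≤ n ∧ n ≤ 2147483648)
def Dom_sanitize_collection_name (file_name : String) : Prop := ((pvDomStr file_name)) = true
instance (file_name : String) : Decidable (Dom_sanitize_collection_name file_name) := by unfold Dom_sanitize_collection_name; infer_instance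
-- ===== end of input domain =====

-- B replaces A's build-then-repeatedly-replace collapse loop by one stateful pass (skip a '_'/'-' equal
-- to the last kept char); same return value, objective: simpler.

-- ===== PORT A =====
-- pvRepOne a s: one left-to-right pass of s.replace(aa, a); bridged to PySem.Chars.replace below and
-- used by the termination lemma pvShrink that pvLoopA's decreasing_by cites.
def pvRepOne (a : Char) : List Char → List Char
  | x :: y :: t => if x = a ∧ y = a then a :: pvRepOne a t else x :: pvRepOne a (y :: t)
  | l => l

theorem pvRepOne_go (a : Char) : ∀ (fuel : Nat) (l acc : List Char), l.length ≤ fuel →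
    PySem.Chars.replace.go [a, a] [a] fuel l acc = acc.reverse ++ pvRepOne a l := by
  intro fuel
  induction fuel with
  | zero =>
    intro l acc h
    have : l = [] := List.eq_nil_of_length_eq_zero (Nat.le_zero.mp h)
    subst this; simp [PySem.Chars.replace.go, pvRepOne]
  | succ n ih =>
    intro l acc h
    rcases l with _ | ⟨c, _ | ⟨y, u⟩⟩
    · simp [PySem.Chars.replace.go, pvRepOne]
    · have hpre : [a, a].isPrefixOf [c] = false := by
        by_cases hca : c = a <;> simp [List.isPrefixOf, hca]
      simp only [PySem.Chars.replace.go, hpre, Bool.false_eq_true, if_false]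
      rw [ih [] (c :: acc) (by simp)]
      simp [pvRepOne]
    · by_cases hc : c = a ∧ y = a
      · obtain ⟨rfl, rfl⟩ := hc
        have hpre : [y, y].isPrefixOf (y :: y :: u) = true := by simp [List.isPrefixOf]
        simp only [PySem.Chars.replace.go, hpre, if_true, List.length_cons, List.length_nil,
          List.drop_succ_cons, List.drop_zero]
        rw [ih u ([y].reverse ++ acc) (by simp at h ⊢; omega)]
        simp [pvRepOne]
      · have hpre : [a, a].isPrefixOf (c :: y :: u) = false := by
          rcases not_and_or.mp hc with h1 | h1 <;> simp [List.isPrefixOf] <;> intro e1 e2 <;>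
            simp_all
        simp only [PySem.Chars.replace.go, hpre, Bool.false_eq_true, if_false]
        rw [ih (y :: u) (c :: acc) (by simp at h ⊢; omega)]
        simp [pvRepOne, hc]

theorem pvReplace_eq (a : Char) (s : List Char) :
    PySem.Chars.replace s [a, a] [a] = pvRepOne a s := by
  simp only [PySem.Chars.replace, List.isEmpty, Bool.false_eq_true, if_false]
  rw [pvRepOne_go a s.length s [] (le_refl _)]
  simp

theorem pvRepOne_len_le (a : Char) : ∀ s : List Char, (pvRepOne a s).length ≤ s.length := by
  intro s
  induction s using pvRepOne.induct a with
  | case1 x y t hc ih => obtain ⟨rfl, rfl⟩ := hc; simp [pvRepOne]; omega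
  | case2 x y t hc ih => simp [pvRepOne, hc]; simpa using ih
  | case3 l h1 =>
    rcases l with _ | ⟨x, _ | ⟨y, u⟩⟩
    · simp [pvRepOne]
    · simp [pvRepOne]
    · exact absurd rfl (fun h => h1 x y u h)

theorem pvRepOne_len_lt (a : Char) : ∀ s : List Char, [a, a] <:+: s →
    (pvRepOne a s).length < s.length := by
  intro s
  induction s using pvRepOne.induct a with
  | case1 x y t hc ih =>
    obtain ⟨rfl, rfl⟩ := hc
    intro _
    have := pvRepOne_len_le y t
    simp [pvRepOne]; omega
  | case2 x y t hc ih =>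
    intro hinf
    have h2 : [a, a] <:+: y :: t := by
      rcases List.infix_cons_iff.mp hinf with hp | hi
      · exfalso
        obtain ⟨e1, hp2⟩ := List.cons_prefix_cons.mp hp
        obtain ⟨e2, _⟩ := List.cons_prefix_cons.mp hp2
        exact hc ⟨e1.symm, e2.symm⟩
      · exact hi
    have := ih h2
    simp [pvRepOne, hc]; simpa using this
  | case3 l h1 =>
    intro hinf
    exfalso
    rcases l with _ | ⟨x, _ | ⟨y, u⟩⟩
    · simp at hinf
    · have := hinf.length_le; simp at this
    · exact h1 x y u rfl

theorem pvRepOne_eq_self (a : Char) : ∀ s : List Char, ¬ [a, a] <:+: s →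
    pvRepOne a s = s := by
  intro s
  induction s using pvRepOne.induct a with
  | case1 x y t hc ih =>
    intro hinf
    exfalso
    obtain ⟨rfl, rfl⟩ := hc
    exact hinf ⟨[], t, rfl⟩
  | case2 x y t hc ih =>
    intro hinf
    have : ¬ [a, a] <:+: y :: t := fun h => hinf (List.infix_cons h)
    simp [pvRepOne, hc, ih this]
  | case3 l h1 =>
    rcases l with _ | ⟨x, _ | ⟨y, u⟩⟩
    · simp [pvRepOne]
    · simp [pvRepOne]
    · exact absurd rfl (fun h => h1 x y u h)

-- length strictly decreases across one iteration of A's while-loop body (cited in decreasing_by)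
theorem pvShrink (cs : List Char)
    (h : (PySem.Chars.isIn ['_', '_'] cs || PySem.Chars.isIn ['-', '-'] cs) = true) :
    (PySem.Chars.replace (PySem.Chars.replace cs ['_', '_'] ['_']) ['-', '-'] ['-']).length
      < cs.length := by
  rw [pvReplace_eq, pvReplace_eq]
  by_cases hu : ['_', '_'] <:+: cs
  · calc (pvRepOne '-' (pvRepOne '_' cs)).length ≤ (pvRepOne '_' cs).length :=
          pvRepOne_len_le _ _
      _ < cs.length := pvRepOne_len_lt _ _ hu
  · rw [pvRepOne_eq_self '_' cs hu]
    rcases Bool.or_eq_true_iff.mp h with h1 | h1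
    · exact absurd ((PySem.Chars.isIn_iff_infix _ _).mp h1) hu
    · exact pvRepOne_len_lt _ _ ((PySem.Chars.isIn_iff_infix _ _).mp h1)

-- the 'while "__" in sanitized or "--" in sanitized' loop of A
def pvLoopA (cs : List Char) : List Char :=
  if h : (PySem.Chars.isIn ['_', '_'] cs || PySem.Chars.isIn ['-', '-'] cs) = true then
    pvLoopA (PySem.Chars.replace (PySem.Chars.replace cs ['_', '_'] ['_']) ['-', '-'] ['-'])
  else cs
termination_by cs.length
decreasing_by exact pvShrink cs h

def sanitize_collection_name (file_name : String) : String :=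
  let cs := file_name.toList
  -- base_name = file_name.rsplit(".", 1)[0]: hand port (exact): everything before the LAST '.', or the whole string
  let base := if PySem.Chars.rfind cs ['.'] = -1 then cs
              else cs.take (PySem.Chars.rfind cs ['.']).toNat
  -- "".join(c for c in base_name if c.isalnum() or c in ["_", "-"])
  let s1 := base.filter (fun c => PySem.Chars.isalnum c || (c = '_' || c = '-'))
  let s2 := pvLoopA s1
  let s3 := PySem.Chars.stripChars s2 ['_', '-']
  let s4 := PySem.Chars.slice s3 none (some 63)
  let s5 := if s4.length < 3 then s4 ++ ['_', 'd', 'o', 'c'] else s4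
  String.ofList s5

-- ===== PORT B =====
def sanitize_collection_name_alt (file_name : String) : String :=
  let cs := file_name.toList
  -- base_name = file_name.rsplit(".", 1)[0]: hand port (exact): everything before the LAST '.', or the whole string
  let base := if PySem.Chars.rfind cs ['.'] = -1 then cs
              else cs.take (PySem.Chars.rfind cs ['.']).toNat
  -- one pass: keep alnum; keep '_'/'-' unless equal to the last kept char
  let out := base.foldl (fun out c =>
      if PySem.Chars.isalnum c then out ++ [c]
      else if c = '_' || c = '-' then
        if out.getLast? ≠ some c then out ++ [c] else out
      else out) []
  let s3 := PySem.Chars.stripChars out ['_', '-']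
  let s4 := PySem.Chars.slice s3 none (some 63)
  let s5 := if s4.length < 3 then s4 ++ ['_', 'd', 'o', 'c'] else s4
  String.ofList s5

-- ===== PRECONDITION & SPEC =====
def Spec_sanitize_collection_name (file_name : String) (out : String) : Prop := out = sanitize_collection_name_alt file_name
instance (file_name : String) (out : String) : Decidable (Spec_sanitize_collection_name file_name out) := by unfold Spec_sanitize_collection_name; infer_instance

-- ===== CLAIM (what is proved, stated in full; the proofs are below) =====
def Claim_equal_sanitize_collection_name : Prop := ∀ (file_name : String), Dom_sanitize_collection_name file_name → Spec_sanitize_collection_name file_name (sanitize_collection_name file_name)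

-- ===== LEMMAS AND PROOFS =====

-- collapse runs of identical separators (the common value of A's loop and B's pass)
def pvCollapse : List Char → List Char
  | x :: y :: t => if (x = '_' ∨ x = '-') ∧ y = x then pvCollapse (y :: t)
                   else x :: pvCollapse (y :: t)
  | l => l

-- B's dedup state machine on the filtered string, state = last kept char
def pvCp : Option Char → List Char → List Char
  | _, [] => []
  | l, c :: t => if (c = '_' ∨ c = '-') ∧ some c = l then pvCp l t else c :: pvCp (some c) t

theorem pvCollapse_cons_cons (x y : Char) (t : List Char) :
    pvCollapse (x :: y :: t) =
      if (x = '_' ∨ x = '-') ∧ y = x then pvCollapse (y :: t) else x :: pvCollapse (y :: t) := rfl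

theorem pvCp_cons (l : Option Char) (c : Char) (t : List Char) :
    pvCp l (c :: t) =
      if (c = '_' ∨ c = '-') ∧ some c = l then pvCp l t else c :: pvCp (some c) t := rfl

theorem pvCollapse_cons : ∀ (u : List Char) (c : Char),
    pvCollapse (c :: u) = c :: pvCp (some c) u := by
  intro u
  induction u with
  | nil => intro c; simp [pvCollapse, pvCp]
  | cons d t ih =>
    intro c
    rw [pvCollapse_cons_cons, pvCp_cons]
    by_cases hdc : d = c
    · subst hdc
      by_cases hsep : d = '_' ∨ d = '-'
      · rw [if_pos ⟨hsep, rfl⟩, if_pos ⟨hsep, rfl⟩, ih]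
      · rw [if_neg (fun h => hsep h.1), if_neg (fun h => hsep h.1), ih]
    · have h1 : ¬ ((c = '_' ∨ c = '-') ∧ d = c) := fun h => hdc h.2
      have h2 : ¬ ((d = '_' ∨ d = '-') ∧ some d = some c) := by
        intro h; exact hdc (Option.some_injective _ h.2)
      rw [if_neg h1, if_neg h2, ih]

theorem pvCp_none (u : List Char) : pvCp none u = pvCollapse u := by
  cases u with
  | nil => simp [pvCp, pvCollapse]
  | cons c t =>
    rw [pvCollapse_cons, pvCp_cons]
    rw [if_neg (by rintro ⟨_, h2⟩; exact Option.some_ne_none c h2)]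

theorem pvCollapse_repOne (a : Char) (ha : a = '_' ∨ a = '-') :
    ∀ (n : Nat) (s : List Char), s.length ≤ n →
      pvCollapse (pvRepOne a s) = pvCollapse s ∧
      ∀ c, pvCollapse (c :: pvRepOne a s) = pvCollapse (c :: s) := by
  intro n
  induction n with
  | zero =>
    intro s h
    have : s = [] := List.eq_nil_of_length_eq_zero (Nat.le_zero.mp h)
    subst this; simp [pvRepOne]
  | succ n ih =>
    intro s h
    rcases s with _ | ⟨x, _ | ⟨y, t⟩⟩
    · simp [pvRepOne]
    · simp [pvRepOne]
    · by_cases hc : x = a ∧ y = a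
      · obtain ⟨rfl, rfl⟩ := hc
        have ht : t.length ≤ n := by simp at h; omega
        have ihc := (ih t ht).2 y
        have hrep : pvRepOne y (y :: y :: t) = y :: pvRepOne y t := by simp [pvRepOne]
        have htail : pvCollapse (y :: y :: t) = pvCollapse (y :: t) := by
          rw [pvCollapse_cons_cons y y t, if_pos ⟨ha, rfl⟩]
        constructor
        · rw [hrep, ihc, htail]
        · intro c
          rw [hrep, pvCollapse_cons_cons c y (pvRepOne y t),
            pvCollapse_cons_cons c y (y :: t), ihc, htail]
      · have hyt : (y :: t).length ≤ n := by simp at h ⊢; omega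
        have ihc := (ih (y :: t) hyt).2
        have hrep : pvRepOne a (x :: y :: t) = x :: pvRepOne a (y :: t) := by
          simp [pvRepOne, hc]
        constructor
        · rw [hrep]; exact ihc x
        · intro c
          rw [hrep, pvCollapse_cons_cons c x (pvRepOne a (y :: t)),
            pvCollapse_cons_cons c x (y :: t), ihc x]

theorem pvCollapse_eq_self : ∀ s : List Char,
    ¬ ['_', '_'] <:+: s → ¬ ['-', '-'] <:+: s → pvCollapse s = s := by
  intro s
  induction s with
  | nil => intros; rfl
  | cons x t ih =>
    intro h1 h2
    cases t with
    | nil => rfl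
    | cons y u =>
      have hng : ¬ ((x = '_' ∨ x = '-') ∧ y = x) := by
        rintro ⟨hx | hx, hy⟩
        · subst hx; subst hy; exact h1 ⟨[], u, rfl⟩
        · subst hx; subst hy; exact h2 ⟨[], u, rfl⟩
      have ih' := ih (fun h => h1 (List.infix_cons h)) (fun h => h2 (List.infix_cons h))
      rw [pvCollapse_cons_cons, if_neg hng, ih']

theorem pvLoopA_eq_collapse : ∀ (n : Nat) (cs : List Char), cs.length ≤ n →
    pvLoopA cs = pvCollapse cs := by
  intro n
  induction n with
  | zero =>
    intro cs h
    have : cs = [] := List.eq_nil_of_length_eq_zero (Nat.le_zero.mp h)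
    subst this
    rw [pvLoopA, dif_neg (by decide)]
    rfl
  | succ n ih =>
    intro cs h
    rw [pvLoopA]
    by_cases hc : (PySem.Chars.isIn ['_', '_'] cs || PySem.Chars.isIn ['-', '-'] cs) = true
    · rw [dif_pos hc]
      have hlt := pvShrink cs hc
      rw [ih _ (by omega)]
      rw [pvReplace_eq, pvReplace_eq]
      rw [(pvCollapse_repOne '-' (Or.inr rfl) (pvRepOne '_' cs).length _ (le_refl _)).1,
        (pvCollapse_repOne '_' (Or.inl rfl) cs.length cs (le_refl _)).1]
    · rw [dif_neg hc]
      have hb := Bool.or_eq_false_iff.mp (by simpa using hc)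
      exact (pvCollapse_eq_self cs
        ((PySem.Chars.isIn_eq_false_iff _ _).mp hb.1)
        ((PySem.Chars.isIn_eq_false_iff _ _).mp hb.2)).symm

theorem pvFoldl_eq : ∀ (s out : List Char),
    s.foldl (fun out c =>
      if PySem.Chars.isalnum c then out ++ [c]
      else if c = '_' || c = '-' then
        if out.getLast? ≠ some c then out ++ [c] else out
      else out) out
    = out ++ pvCp out.getLast?
        (s.filter (fun c => PySem.Chars.isalnum c || (c = '_' || c = '-'))) := by
  intro s
  induction s with
  | nil => intro out; simp [pvCp]
  | cons c t ih =>
    intro out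
    rw [List.foldl_cons]
    by_cases han : PySem.Chars.isalnum c = true
    · have hkeep : (PySem.Chars.isalnum c || (c = '_' || c = '-')) = true := by simp [han]
      have hnsep : ¬ (c = '_' ∨ c = '-') := by
        rintro (rfl | rfl) <;> revert han <;> decide
      rw [if_pos han, ih, List.getLast?_concat, List.filter_cons, if_pos hkeep, pvCp_cons,
        if_neg (fun h => hnsep h.1), List.append_assoc, List.singleton_append]
    · by_cases hsep : (c = '_' || c = '-') = true
      · have hkeep : (PySem.Chars.isalnum c || (c = '_' || c = '-')) = true := by simp [hsep]
        have hsep' : c = '_' ∨ c = '-' := by simpa using hsep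
        rw [if_neg (by simp [han]), if_pos hsep]
        by_cases hl : out.getLast? = some c
        · rw [if_neg (by simpa using hl), ih, List.filter_cons, if_pos hkeep, pvCp_cons,
            if_pos ⟨hsep', hl.symm⟩]
        · rw [if_pos (by simpa using hl), ih, List.getLast?_concat, List.filter_cons,
            if_pos hkeep, pvCp_cons, if_neg (fun h => hl h.2.symm), List.append_assoc,
            List.singleton_append]
      · have hdrop : (PySem.Chars.isalnum c || (c = '_' || c = '-')) = false := by
          simp at han hsep ⊢; exact ⟨han, hsep⟩
        rw [if_neg (by simp [han]), if_neg (by simp [hsep]), ih, List.filter_cons, hdrop]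
        simp

-- ===== VERDICT (by name: the statement is the Claim_ definition above) =====
theorem sanitize_collection_name_spec : Claim_equal_sanitize_collection_name := by
  intro file_name _
  unfold Spec_sanitize_collection_name sanitize_collection_name sanitize_collection_name_alt
  simp only
  rw [pvFoldl_eq, List.nil_append, List.getLast?_nil, pvCp_none,
    pvLoopA_eq_collapse (List.filter _ _).length _ (le_refl _)]
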